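-- pv_equiv track=rewrite | github.com/crawfordk37/GA-Tech-HW | HW4.py | multiplyNums
-- ===== SOURCE A (Python) =====
-- def multiplyNums(nums):
--     index = 1
--     for num in nums: ##runs through all of the numbers
--         if index<len(nums): ##confirms we won't be going out of the range
--             nums[index-1] = num*nums[index] ##changes the number to be multiplied by the next number
--         else: ##used to do the different thing for the last number
--             nums[index-1] *= num
--         index += 1
--     return nums
-- ===== SOURCE B (Python) =====
-- def multiplyNums(nums):
--     out = []
--     prev = None  # the right neighbour already seen (we walk right-to-left)
--     for x in reversed(nums):
--         out.append(x * (x if prev is None else prev))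
--         prev = x
--     out.reverse()
--     nums[:] = out
--     return nums
-- ===== Notes on version B (the rewrite author's own statement) =====
-- stated objective: alternative
-- what changed: Traverses the list right-to-left carrying the right-neighbour in an accumulator (seeded None, so the last element squares itself) and builds the output back-to-front, then reverses and assigns back in place, instead of A's forward index-guarded in-place loop.
import Mathlib
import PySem

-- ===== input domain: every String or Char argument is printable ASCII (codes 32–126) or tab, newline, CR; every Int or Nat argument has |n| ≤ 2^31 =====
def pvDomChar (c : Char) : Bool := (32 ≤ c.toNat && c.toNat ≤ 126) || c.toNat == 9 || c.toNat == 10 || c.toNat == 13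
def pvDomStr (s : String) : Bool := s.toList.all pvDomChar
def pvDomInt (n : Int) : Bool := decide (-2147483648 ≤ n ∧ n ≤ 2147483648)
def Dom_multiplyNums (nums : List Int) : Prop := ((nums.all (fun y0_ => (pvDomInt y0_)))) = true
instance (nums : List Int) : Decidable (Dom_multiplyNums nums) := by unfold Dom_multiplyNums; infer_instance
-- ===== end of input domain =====

-- B walks the list right-to-left carrying the right neighbour in an accumulator and builds the
-- output back-to-front (alternative traversal, branch-free); both A and B mutate the Python
-- argument list in place — the equivalence proved here is about the return value.

-- ===== PORT A =====
-- One loop iteration of A: index-1 is `i`; `num` is the element the Python iterator yields, which at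
-- that moment equals the live nums[i] (positions < i are the only ones modified so far), so it is
-- read from the live list `acc`.  The list length never changes, so len(nums) is the captured `n`.
def pvStepA (n : Nat) (acc : List Int) (i : Nat) : List Int :=
  let num := acc.getD i 0
  if i + 1 < n then acc.set i (num * acc.getD (i + 1) 0)
  else acc.set i (acc.getD i 0 * num)

def multiplyNums (nums : List Int) : List Int :=
  (List.range nums.length).foldl (pvStepA nums.length) nums

-- ===== PORT B =====
-- The reversed-for loop of Source B: a fold over nums.reverse with state (out, prev);
-- `out.append` is list append at the end, `prev is None` is the Option match; final `out.reverse()`.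
def pvStepB (st : List Int × Option Int) (x : Int) : List Int × Option Int :=
  (st.1 ++ [x * (match st.2 with | none => x | some p => p)], some x)

def multiplyNums_alt (nums : List Int) : List Int :=
  (nums.reverse.foldl pvStepB ([], none)).1.reverse

-- ===== PRECONDITION & SPEC =====
def Spec_multiplyNums (nums : List Int) (out : List Int) : Prop := out = multiplyNums_alt nums
instance (nums : List Int) (out : List Int) : Decidable (Spec_multiplyNums nums out) := by unfold Spec_multiplyNums; infer_instance

-- ===== CLAIM (what is proved, stated in full; the proofs are below) =====
def Claim_equal_multiplyNums : Prop := ∀ (nums : List Int), Dom_multiplyNums nums → Spec_multiplyNums nums (multiplyNums nums)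

-- ===== LEMMAS AND PROOFS =====

-- Common characterisation of both programs' result: each element times its right neighbour,
-- the last element squared.
def pvPair : List Int → List Int
  | [] => []
  | [x] => [x * x]
  | x :: y :: t => x * y :: pvPair (y :: t)

theorem pv_getD_mid (pre t : List Int) (x : Int) :
    (pre ++ x :: t).getD pre.length 0 = x := by
  induction pre with
  | nil => rfl
  | cons a pre ih => simp only [List.cons_append]; exact ih

theorem pv_getD_mid1 (pre t : List Int) (x y : Int) :
    (pre ++ x :: y :: t).getD (pre.length + 1) 0 = y := by
  induction pre with
  | nil => rfl
  | cons a pre ih => simp only [List.cons_append, List.length_cons, List.getD_cons_succ]; exact ih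

theorem pv_set_mid (pre t : List Int) (x v : Int) :
    (pre ++ x :: t).set pre.length v = pre ++ v :: t := by
  induction pre with
  | nil => rfl
  | cons a pre ih => simp [List.set_cons_succ, ih]

theorem pv_foldl_main (l : List Int) : ∀ (pre : List Int),
    (List.range' pre.length l.length).foldl (pvStepA (pre.length + l.length)) (pre ++ l)
      = pre ++ pvPair l := by
  induction l with
  | nil => intro pre; simp [pvPair]
  | cons x t ih =>
    intro pre
    rw [List.length_cons, List.range'_succ, List.foldl_cons]
    cases t with
    | nil =>
      have hstep : pvStepA (pre.length + ([] : List Int).length.succ) (pre ++ [x]) pre.length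
          = pre ++ [x * x] := by
        simp [pvStepA]
      rw [hstep]; simp [pvPair]
    | cons y t' =>
      have hstep : pvStepA (pre.length + ((y :: t').length + 1)) (pre ++ x :: y :: t') pre.length
          = pre ++ (x * y) :: y :: t' := by
        have hc : pre.length + 1 < pre.length + ((y :: t').length + 1) := by
          simp
        simp only [pvStepA, pv_getD_mid, pv_getD_mid1, pv_set_mid, hc, if_pos]
      rw [hstep]
      have h2 := ih (pre ++ [x * y])
      simp only [List.length_append, List.length_cons, List.length_nil, List.append_assoc,
        List.cons_append, List.nil_append] at h2 ⊢
      have he : pre.length + 1 + (t'.length + 1) = pre.length + (t'.length + 1 + 1) := by omega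
      rw [he] at h2
      rw [h2]
      simp [pvPair]

theorem pvA_eq_pair (nums : List Int) : multiplyNums nums = pvPair nums := by
  have h := pv_foldl_main nums []
  simpa [multiplyNums, List.range_eq_range'] using h

-- The product segment B emits while scanning list `l` with right-neighbour state `prev`.
def pvSeg : List Int → Option Int → List Int
  | [], _ => []
  | x :: t, prev => x * (match prev with | none => x | some p => p) :: pvSeg t (some x)

theorem pvB_fold (l : List Int) : ∀ (out : List Int) (prev : Option Int),
    (l.foldl pvStepB (out, prev)).1 = out ++ pvSeg l prev := by
  induction l with
  | nil => intro out prev; simp [pvSeg]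
  | cons x t ih => intro out prev; simp [pvStepB, pvSeg, ih]

theorem pvSeg_append (a b : List Int) : ∀ (prev : Option Int),
    pvSeg (a ++ b) prev = pvSeg a prev ++ pvSeg b (match a.getLast? with | none => prev | some z => some z) := by
  induction a with
  | nil => intro prev; simp [pvSeg]
  | cons c a' ih =>
    intro prev
    have hm : (match (c :: a').getLast? with | none => prev | some z => some z)
        = (match a'.getLast? with | none => some c | some z => some z) := by
      cases a' with
      | nil => simp
      | cons d a'' =>
        cases h : (d :: a'').getLast? with
        | none => simp [List.getLast?_eq_none_iff] at h
        | some z => rw [List.getLast?_cons_cons, h]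
    rw [List.cons_append, hm]
    simp only [pvSeg, List.cons_append]
    rw [ih (some c)]

theorem pvSeg_rev (l : List Int) : pvSeg l.reverse none = (pvPair l).reverse := by
  induction l with
  | nil => rfl
  | cons x t ih =>
    cases t with
    | nil => rfl
    | cons y t' =>
      have hlast : ((y :: t').reverse).getLast? = some y := by
        simp [List.getLast?_reverse]
      rw [List.reverse_cons, pvSeg_append, hlast, ih]
      simp [pvSeg, pvPair]

theorem pvB_eq_pair (nums : List Int) : multiplyNums_alt nums = pvPair nums := by
  unfold multiplyNums_alt
  rw [pvB_fold, List.nil_append, pvSeg_rev, List.reverse_reverse]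

-- ===== VERDICT (by name: the statement is the Claim_ definition above) =====
theorem multiplyNums_spec : Claim_equal_multiplyNums := by
  intro nums _
  unfold Spec_multiplyNums
  rw [pvA_eq_pair, pvB_eq_pair]
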